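-- pv_equiv track=rewrite | github.com/robyrai/hackerRank | calc_prod_qty.py | calc_prod_qty
-- ===== SOURCE A (Python) =====
-- def calc_prod_qty(prod_qty_list: list[tuple]) -> list[tuple]:
--     prod_idx_map = dict()  # {211: 0, 262: 1,...}
--     result = []  # [(211, 4),...]
--     idx_ctr = 0
--     for i, prod_qty in enumerate(prod_qty_list):
--         prod = prod_qty[0]
--         qty = prod_qty[1]
--         if prod in prod_idx_map:
--             existing_qty = result[prod_idx_map[prod]][1]
--             new_qty = existing_qty + qty
--             result[prod_idx_map[prod]] = (prod, new_qty)
--         else: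
--             prod_idx_map[prod] = idx_ctr
--             idx_ctr += 1
--             result.append((prod, qty))
--     return result
-- ===== SOURCE B (Python) =====
-- def calc_prod_qty(prod_qty_list: list[tuple]) -> list[tuple]:
--     order = dict.fromkeys(prod for prod, _ in prod_qty_list)
--     return [(prod, sum(qty for p, qty in prod_qty_list if p == prod))
--             for prod in order]
-- ===== Notes on version B (the rewrite author's own statement) =====
-- stated objective: alternative
-- what changed: B is a two-stage group-by: it first lists the distinct products in first-seen order (dict.fromkeys) and then, for each product, sums its quantities by a separate scan of the whole input - no running totals, no index map, no in-place list mutation.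
import Mathlib
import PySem

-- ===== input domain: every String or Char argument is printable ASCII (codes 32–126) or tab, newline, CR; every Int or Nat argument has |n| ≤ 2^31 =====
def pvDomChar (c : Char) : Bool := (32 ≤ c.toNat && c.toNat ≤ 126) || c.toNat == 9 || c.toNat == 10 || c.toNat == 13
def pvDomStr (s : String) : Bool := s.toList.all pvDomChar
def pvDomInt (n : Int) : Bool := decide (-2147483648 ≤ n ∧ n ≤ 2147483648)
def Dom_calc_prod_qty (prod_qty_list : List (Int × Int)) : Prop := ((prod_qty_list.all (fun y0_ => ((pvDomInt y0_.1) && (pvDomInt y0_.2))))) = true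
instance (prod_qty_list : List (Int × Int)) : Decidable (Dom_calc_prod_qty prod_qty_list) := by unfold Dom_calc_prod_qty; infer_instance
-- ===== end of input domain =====

-- B replaces A's single-pass accumulation (index map + in-place result mutation) by a
-- two-stage group-by: distinct products in first-seen order, then one summing scan per
-- product (objective: alternative; not faster).

-- ===== PORT A =====
-- loop body of A: state = (prod_idx_map, result, idx_ctr); the enumerate index i is unused, as in A
def calcStepA (st : PySem.Dict Int Int × List (Int × Int) × Int) (ipq : Int × (Int × Int)) :
    PySem.Dict Int Int × List (Int × Int) × Int :=
  let m := st.1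
  let result := st.2.1
  let idx_ctr := st.2.2
  let prod := ipq.2.1
  let qty := ipq.2.2
  if m.contains prod then
    -- prod_idx_map[prod]: the key is present (guarded by the membership test), so getD never uses its default
    let idx := m.getD prod 0
    -- result[idx]: idx is always a valid index of result here, so pyGetD/pySetD never use their defaults
    let existing_qty := (PySem.List.pyGetD result idx (0, 0)).2
    let new_qty := existing_qty + qty
    (m, PySem.List.pySetD result idx (prod, new_qty), idx_ctr)
  else
    (m.insert prod idx_ctr, result ++ [(prod, qty)], idx_ctr + 1)

def calc_prod_qty (prod_qty_list : List (Int × Int)) : List (Int × Int) :=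
  ((PySem.List.enumerate prod_qty_list 0).foldl calcStepA (PySem.Dict.empty, [], 0)).2.1

-- ===== PORT B =====
-- sum(qty for p, qty in prod_qty_list if p == prod)
def sumFor (prod_qty_list : List (Int × Int)) (prod : Int) : Int :=
  ((prod_qty_list.filter (fun r => r.1 == prod)).map (·.2)).sum

-- order = dict.fromkeys(prod for prod, _ in …)  →  PySem.List.dedup (first occurrences, in order)
def calc_prod_qty_alt (prod_qty_list : List (Int × Int)) : List (Int × Int) :=
  (PySem.List.dedup (prod_qty_list.map (·.1))).map (fun prod => (prod, sumFor prod_qty_list prod))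

-- ===== PRECONDITION & SPEC =====
def Spec_calc_prod_qty (prod_qty_list : List (Int × Int)) (out : List (Int × Int)) : Prop := out = calc_prod_qty_alt prod_qty_list
instance (prod_qty_list : List (Int × Int)) (out : List (Int × Int)) : Decidable (Spec_calc_prod_qty prod_qty_list out) := by unfold Spec_calc_prod_qty; infer_instance

-- ===== CLAIM (what is proved, stated in full; the proofs are below) =====
def Claim_equal_calc_prod_qty : Prop := ∀ (prod_qty_list : List (Int × Int)), Dom_calc_prod_qty prod_qty_list → Spec_calc_prod_qty prod_qty_list (calc_prod_qty prod_qty_list)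

-- ===== LEMMAS AND PROOFS =====

-- keys of xs not yet in seen, first occurrences in order (proof-only characterisation of A's appends)
def freshKeys : List (Int × Int) → List Int → List Int
  | [], _ => []
  | (p, _) :: t, seen => if p ∈ seen then freshKeys t seen else p :: freshKeys t (seen ++ [p])

lemma sumFor_nil (k : Int) : sumFor [] k = 0 := rfl

lemma sumFor_cons_self (p q : Int) (t : List (Int × Int)) :
    sumFor ((p, q) :: t) p = q + sumFor t p := by
  simp [sumFor]

lemma sumFor_cons_ne (p q k : Int) (t : List (Int × Int)) (h : k ≠ p) :
    sumFor ((p, q) :: t) k = sumFor t k := by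
  simp [sumFor, Ne.symm h]

lemma mem_freshKeys_not_seen : ∀ (xs : List (Int × Int)) (seen : List Int) (x : Int),
    x ∈ freshKeys xs seen → x ∉ seen := by
  intro xs
  induction xs with
  | nil => intro seen x h; simp [freshKeys] at h
  | cons a t ih =>
      obtain ⟨p, q⟩ := a
      intro seen x h
      by_cases hp : p ∈ seen
      · exact ih seen x (by simpa [freshKeys, hp] using h)
      · rcases (by simpa [freshKeys, hp] using h : x = p ∨ x ∈ freshKeys t (seen ++ [p])) with h1 | h1
        · exact h1 ▸ hp
        · intro hx; exact ih (seen ++ [p]) x h1 (by simp [hx])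

-- freshKeys is PySem.Set.add folded over the keys, relative to seen
lemma freshKeys_eq_foldl_add : ∀ (xs : List (Int × Int)) (seen : List Int),
    seen ++ freshKeys xs seen = (xs.map (·.1)).foldl PySem.Set.add seen := by
  intro xs
  induction xs with
  | nil => intro seen; simp [freshKeys]
  | cons a t ih =>
      obtain ⟨p, q⟩ := a
      intro seen
      by_cases hp : p ∈ seen
      · simp only [freshKeys, if_pos hp, List.map_cons, List.foldl_cons,
          PySem.Set.add_of_mem hp]
        exact ih seen
      · simp only [freshKeys, if_neg hp, List.map_cons, List.foldl_cons,
          PySem.Set.add_of_not_mem hp]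
        rw [← ih (seen ++ [p])]
        simp

lemma freshKeys_nil_eq_dedup (xs : List (Int × Int)) :
    freshKeys xs [] = PySem.List.dedup (xs.map (·.1)) := by
  have h := freshKeys_eq_foldl_add xs []
  simp only [List.nil_append] at h
  rw [h, PySem.List.dedup_eq_ofList, PySem.Set.ofList_eq_foldl]

-- A's loop ignores the enumerate index
lemma foldl_enumerate_stepA : ∀ (xs : List (Int × Int)) (s : Int)
    (st : PySem.Dict Int Int × List (Int × Int) × Int),
    (PySem.List.enumerate xs s).foldl calcStepA st
      = xs.foldl (fun st pq => calcStepA st (0, pq)) st := by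
  intro xs
  induction xs with
  | nil => intro s st; rfl
  | cons x t ih =>
      intro s st
      rw [PySem.List.enumerate_cons, List.foldl_cons, List.foldl_cons, ih]
      rfl

lemma idxOf?_append_singleton_self (l : List Int) (a : Int) (h : a ∉ l) :
    (l ++ [a]).idxOf? a = some l.length := by
  induction l with
  | nil => simp [List.idxOf?_cons]
  | cons b t ih =>
      simp only [List.mem_cons, not_or] at h
      simp [List.idxOf?_cons, Ne.symm h.1, ih h.2]

lemma idxOf?_append_singleton_ne (l : List Int) (a b : Int) (h : b ≠ a) :
    (l ++ [a]).idxOf? b = l.idxOf? b := by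
  induction l with
  | nil => simp [List.idxOf?_cons, Ne.symm h]
  | cons c t ih =>
      by_cases hc : c = b <;> simp [List.idxOf?_cons, hc, ih]

-- the main loop invariant: A's (map, result, counter) vs B's group-by decomposition
lemma loop_eq : ∀ (xs res : List (Int × Int)) (m : PySem.Dict Int Int),
    (res.map (·.1)).Nodup →
    (∀ p, m.get? p = ((res.map (·.1)).idxOf? p).map (fun n => (n : Int))) →
    (xs.foldl (fun st pq => calcStepA st (0, pq)) (m, res, (res.length : Int))).2.1
      = res.map (fun r => (r.1, r.2 + sumFor xs r.1))
        ++ (freshKeys xs (res.map (·.1))).map (fun p => (p, sumFor xs p)) := by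
  intro xs
  induction xs with
  | nil =>
      intro res m _ _
      simp [freshKeys, sumFor_nil]
  | cons x t ih =>
      intro res m hnd hinv
      obtain ⟨p, q⟩ := x
      by_cases hmem : p ∈ res.map (·.1)
      · -- existing key: A sets the stored index; the key set is unchanged
        obtain ⟨i, hidx⟩ := Option.isSome_iff_exists.mp (List.isSome_idxOf?.mpr hmem)
        obtain ⟨hi, hk, hmin⟩ := List.idxOf?_eq_some_iff.mp hidx
        have hilt : i < res.length := by simpa using hi
        have hk' : (res[i]).1 = p := by simpa using hk
        have huniq : ∀ j (hj : j < res.length), j ≠ i → (res[j]).1 ≠ p := by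
          intro j hj hji h
          have h1 : (res.map (·.1))[j]'(by simpa using hj) = (res.map (·.1))[i]'(by simpa using hilt) := by
            simp only [List.getElem_map]
            rw [h, hk']
          exact hji (hnd.getElem_inj_iff.mp h1)
        have hcontA : m.contains p = true := by
          have h1 : (m.get? p).isSome = true := by simp [hinv p, hidx]
          simp only [PySem.Dict.get?, Option.isSome_map, List.find?_isSome] at h1
          simp only [PySem.Dict.contains, List.any_eq_true]
          exact h1
        have hgetm : m.getD p 0 = (i : Int) := by
          simp [PySem.Dict.getD, hinv p, hidx]
        have hgetA : PySem.List.pyGetD res ((i : Nat) : Int) (0, 0) = res[i] := by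
          rw [PySem.List.pyGetD_natCast, List.getD_eq_getElem res (0,0) hilt]
        have hsetA : PySem.List.pySetD res ((i : Nat) : Int) (p, (res[i]).2 + q)
            = res.set i (p, (res[i]).2 + q) := by
          simp [PySem.List.pySetD, PySem.List.pySet?_natCast res i _ hilt]
        set res' := res.set i (p, (res[i]).2 + q) with hres'
        have hstepA : calcStepA (m, res, (res.length : Int)) (0, (p, q))
            = (m, res', (res.length : Int)) := by
          simp only [calcStepA, hcontA, if_pos, hgetm, hgetA, hsetA]
        have hkeys : res'.map (·.1) = res.map (·.1) := by
          rw [hres', List.map_set]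
          have : (res.map (·.1)).set i p = (res.map (·.1)).set i (res.map (·.1))[i] := by
            simp [List.getElem_map, hk']
          rw [this, List.set_getElem_self]
        have hlen : (res'.length : Int) = (res.length : Int) := by simp [hres']
        -- the mutated prefix, re-expressed over the original res with the cons sum
        have hmap : res'.map (fun r => (r.1, r.2 + sumFor t r.1))
            = res.map (fun r => (r.1, r.2 + sumFor ((p, q) :: t) r.1)) := by
          apply List.ext_getElem
          · simp [hres']
          · intro j h1 h2
            have hj : j < res.length := by simpa using h2
            simp only [List.getElem_map, hres', List.getElem_set]
            by_cases hij : i = j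
            · subst hij
              simp only [if_true, hk', sumFor_cons_self, Prod.mk.injEq, true_and]
              omega
            · have hne : (res[j]).1 ≠ p := huniq j hj (fun h => hij h.symm)
              simp only [if_neg hij, sumFor_cons_ne _ _ _ _ hne]
        -- the fresh suffix: its keys avoid p, so the cons sum equals the tail sum
        have hfresh : (freshKeys t (res.map (·.1))).map (fun p' => (p', sumFor t p'))
            = (freshKeys t (res.map (·.1))).map (fun p' => (p', sumFor ((p, q) :: t) p')) := by
          apply List.map_congr_left
          intro x hx
          have hxs := mem_freshKeys_not_seen t _ x hx
          have : x ≠ p := fun h => hxs (h ▸ hmem)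
          rw [sumFor_cons_ne _ _ _ _ this]
        calc (((p, q) :: t).foldl (fun st pq => calcStepA st (0, pq)) (m, res, (res.length : Int))).2.1
            = (t.foldl (fun st pq => calcStepA st (0, pq)) (m, res', (res'.length : Int))).2.1 := by
              rw [List.foldl_cons, hstepA, hlen]
          _ = res'.map (fun r => (r.1, r.2 + sumFor t r.1))
              ++ (freshKeys t (res'.map (·.1))).map (fun p' => (p', sumFor t p')) :=
              ih res' m (hkeys ▸ hnd) (fun p' => by rw [hinv p', hkeys])
          _ = res.map (fun r => (r.1, r.2 + sumFor ((p, q) :: t) r.1))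
              ++ (freshKeys ((p, q) :: t) (res.map (·.1))).map (fun p' => (p', sumFor ((p, q) :: t) p')) := by
              rw [hmap, hkeys, hfresh, freshKeys, if_pos hmem]
      · -- new key: A appends; the fresh-key list gains p at its head
        have hidx : (res.map (·.1)).idxOf? p = none := by
          cases h : (res.map (·.1)).idxOf? p with
          | none => rfl
          | some i => exact absurd (List.isSome_idxOf?.mp (by simp [h])) hmem
        have hget : m.get? p = none := by simp [hinv p, hidx]
        have hfindnone : m.items.find? (fun r => r.1 == p) = none := by
          have h1 := hget
          simp only [PySem.Dict.get?, Option.map_eq_none_iff] at h1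
          exact h1
        have hcontA : m.contains p = false := by
          simp only [PySem.Dict.contains, List.any_eq_false]
          intro r hr
          exact List.find?_eq_none.mp hfindnone r hr
        set res' := res ++ [(p, q)] with hres'
        have hstepA : calcStepA (m, res, (res.length : Int)) (0, (p, q))
            = (m.insert p (res.length : Int), res', (res.length : Int) + 1) := by
          simp only [calcStepA, hcontA]; rfl
        have hkeys' : res'.map (·.1) = res.map (·.1) ++ [p] := by simp [hres']
        have hnd' : (res'.map (·.1)).Nodup := by
          rw [hkeys']
          refine List.nodup_append.mpr ⟨hnd, by simp, ?_⟩
          intro a ha b hb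
          simp only [List.mem_singleton] at hb
          intro h
          exact hmem ((h.trans hb) ▸ ha)
        have hinv' : ∀ p', (m.insert p (res.length : Int)).get? p'
            = ((res'.map (·.1)).idxOf? p').map (fun n => (n : Int)) := by
          intro p'
          by_cases hp' : p' = p
          · subst hp'
            rw [PySem.Dict.get?_insert_self, hkeys',
              idxOf?_append_singleton_self _ _ hmem]
            simp
          · rw [PySem.Dict.get?_insert_of_ne _ _ hp', hinv p', hkeys',
              idxOf?_append_singleton_ne _ _ _ hp']
        have hlen : (res'.length : Int) = (res.length : Int) + 1 := by simp [hres']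
        -- the untouched prefix: its keys avoid p
        have hmap : res.map (fun r => (r.1, r.2 + sumFor t r.1))
            = res.map (fun r => (r.1, r.2 + sumFor ((p, q) :: t) r.1)) := by
          apply List.map_congr_left
          intro r hr
          have : r.1 ≠ p := fun h => hmem (h ▸ List.mem_map_of_mem hr)
          rw [sumFor_cons_ne _ _ _ _ this]
        -- the fresh suffix after the append: its keys avoid p
        have hfresh : (freshKeys t (res.map (·.1) ++ [p])).map (fun p' => (p', sumFor t p'))
            = (freshKeys t (res.map (·.1) ++ [p])).map (fun p' => (p', sumFor ((p, q) :: t) p')) := by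
          apply List.map_congr_left
          intro x hx
          have hxs := mem_freshKeys_not_seen t _ x hx
          have : x ≠ p := fun h => hxs (by simp [h])
          rw [sumFor_cons_ne _ _ _ _ this]
        calc (((p, q) :: t).foldl (fun st pq => calcStepA st (0, pq)) (m, res, (res.length : Int))).2.1
            = (t.foldl (fun st pq => calcStepA st (0, pq))
                (m.insert p (res.length : Int), res', (res'.length : Int))).2.1 := by
              rw [List.foldl_cons, hstepA, hlen]
          _ = res'.map (fun r => (r.1, r.2 + sumFor t r.1))
              ++ (freshKeys t (res'.map (·.1))).map (fun p' => (p', sumFor t p')) :=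
              ih res' (m.insert p (res.length : Int)) hnd' hinv'
          _ = res.map (fun r => (r.1, r.2 + sumFor ((p, q) :: t) r.1))
              ++ (freshKeys ((p, q) :: t) (res.map (·.1))).map (fun p' => (p', sumFor ((p, q) :: t) p')) := by
              rw [hres', List.map_append, hkeys', hfresh, freshKeys, if_neg hmem]
              simp [hmap, sumFor_cons_self]

-- ===== VERDICT (by name: the statement is the Claim_ definition above) =====
theorem calc_prod_qty_spec : Claim_equal_calc_prod_qty := by
  intro xs _
  unfold Spec_calc_prod_qty calc_prod_qty calc_prod_qty_alt
  rw [foldl_enumerate_stepA]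
  have h := loop_eq xs [] PySem.Dict.empty (by simp) (by intro p; rfl)
  simp only [List.length_nil, Nat.cast_zero, List.map_nil, List.nil_append] at h
  rw [h, freshKeys_nil_eq_dedup]
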